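-- pv_equiv track=rewrite | github.com/techize/batchivo | backend/app/api/v1/shop_resolver.py | extract_subdomain
-- ===== SOURCE A (Python) =====
-- PLATFORM_DOMAINS = {
--     "batchivo.com",
--     "batchivo.shop",
--     "www.batchivo.com",
--     "www.batchivo.shop",
--     "api.batchivo.com",
--     "localhost",
-- }
--
-- PLATFORM_SUBDOMAINS = {"www", "api", "admin", "dashboard", "app", "shop"}
--
-- def extract_subdomain(hostname: str) -> str | None:
--     """
--     Extract subdomain from hostname.
--
--     Args:
--         hostname: Full hostname (e.g., mystmereforge.batchivo.shop)
--
--     Returns: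
--         Subdomain or None if no valid subdomain found
--     """
--     # Remove port if present
--     hostname = hostname.split(":")[0].lower()
--
--     # Check if it's a platform domain (no subdomain to extract)
--     if hostname in PLATFORM_DOMAINS:
--         return None
--
--     # Check for subdomain pattern (x.batchivo.shop or x.batchivo.com)
--     for base_domain in ["batchivo.shop", "batchivo.com"]:
--         if hostname.endswith(f".{base_domain}"):
--             subdomain = hostname[: -(len(base_domain) + 1)]
--             # Ignore platform subdomains
--             if subdomain not in PLATFORM_SUBDOMAINS:
--                 return subdomain
--
--     return None
-- ===== SOURCE B (Python) =====
-- PLATFORM_SUBDOMAINS = {"www", "api", "admin", "dashboard", "app", "shop"}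
--
--
-- def extract_subdomain(hostname: str) -> str | None:
--     """Tokenize the hostname into dot-separated labels and read the
--     subdomain off the label list instead of suffix-matching base domains."""
--     host = hostname.split(":")[0].lower()
--     parts = host.split(".")
--     if len(parts) >= 3 and parts[-2] == "batchivo" and parts[-1] in ("com", "shop"):
--         sub = ".".join(parts[:-2])
--         if sub not in PLATFORM_SUBDOMAINS:
--             return sub
--     return None
-- ===== Notes on version B (the rewrite author's own statement) =====
-- stated objective: alternative
-- what changed: B tokenizes the (port-stripped, lowercased) hostname into dot-separated labels and reads the subdomain off the label list (last two labels must be 'batchivo' + 'com'/'shop'), instead of A's loop over base domains with endswith/negative-slice; the PLATFORM_DOMAINS early-return disappears because every platform domain already fails the label test or yields a platform subdomain.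
import Mathlib
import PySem

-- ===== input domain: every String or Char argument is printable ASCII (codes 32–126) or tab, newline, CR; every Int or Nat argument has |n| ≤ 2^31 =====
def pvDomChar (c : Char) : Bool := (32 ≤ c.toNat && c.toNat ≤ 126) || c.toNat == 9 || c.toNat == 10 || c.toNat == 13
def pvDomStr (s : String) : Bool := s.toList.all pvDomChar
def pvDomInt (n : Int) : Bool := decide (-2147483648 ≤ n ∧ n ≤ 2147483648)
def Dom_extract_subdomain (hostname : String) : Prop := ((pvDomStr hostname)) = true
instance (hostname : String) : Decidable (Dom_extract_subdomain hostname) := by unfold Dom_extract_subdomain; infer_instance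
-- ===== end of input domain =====

-- B replaces A's endswith/slice loop over base domains by tokenizing the hostname into
-- dot-separated labels and reading the subdomain off the label list (objective: alternative).

-- ===== PORT A =====
def pvPLATFORM_DOMAINS : PySem.Set (List Char) :=
  ["batchivo.com".toList, "batchivo.shop".toList, "www.batchivo.com".toList,
   "www.batchivo.shop".toList, "api.batchivo.com".toList, "localhost".toList]

def pvPLATFORM_SUBDOMAINS : PySem.Set (List Char) :=
  ["www".toList, "api".toList, "admin".toList, "dashboard".toList, "app".toList, "shop".toList]

-- the 'for base_domain in [...]' loop: try each base domain in order
def pvTryBases (h : List Char) : List (List Char) → Option (List Char)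
  | [] => none
  | base :: rest =>
      if PySem.Chars.endswith h ('.' :: base) = true then
        -- subdomain = hostname[: -(len(base_domain) + 1)]
        let sub := PySem.Chars.slice h none (some (-((base.length : Int) + 1)))
        if sub ∈ pvPLATFORM_SUBDOMAINS then pvTryBases h rest else some sub
      else pvTryBases h rest

def extract_subdomain (hostname : String) : Option String :=
  -- hostname.split(":")[0].lower()  (split with a non-empty sep always returns a non-empty list,
  -- so the [0] indexing never raises; ported as .headD [])
  let h := PySem.Chars.lower (((PySem.Chars.split? hostname.toList [':']).getD []).headD [])
  if h ∈ pvPLATFORM_DOMAINS then none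
  else (pvTryBases h ["batchivo.shop".toList, "batchivo.com".toList]).map String.ofList

-- ===== PORT B =====
def extract_subdomain_alt (hostname : String) : Option String :=
  let h := PySem.Chars.lower (((PySem.Chars.split? hostname.toList [':']).getD []).headD [])
  let parts := (PySem.Chars.split? h ['.']).getD []
  if 3 ≤ parts.length ∧ PySem.List.pyGet? parts (-2) = some "batchivo".toList ∧
      (PySem.List.pyGet? parts (-1) = some "com".toList ∨
       PySem.List.pyGet? parts (-1) = some "shop".toList) then
    let sub := PySem.Chars.join ['.'] (PySem.List.slice parts none (some (-2)))
    if sub ∈ pvPLATFORM_SUBDOMAINS then none else some (String.ofList sub)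
  else none

-- ===== PRECONDITION & SPEC =====
def Spec_extract_subdomain (hostname : String) (out : Option String) : Prop := out = extract_subdomain_alt hostname
instance (hostname : String) (out : Option String) : Decidable (Spec_extract_subdomain hostname out) := by unfold Spec_extract_subdomain; infer_instance

-- ===== CLAIM (what is proved, stated in full; the proofs are below) =====
def Claim_equal_extract_subdomain : Prop := ∀ (hostname : String), Dom_extract_subdomain hostname → Spec_extract_subdomain hostname (extract_subdomain hostname)

-- ===== LEMMAS AND PROOFS =====

/-- Reference splitter on '.' used only in proofs. -/
def pvConsFirst (p : List Char) : List (List Char) → List (List Char)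
  | [] => [p]
  | x :: xs => (p ++ x) :: xs

def pvSplitDots : List Char → List (List Char)
  | [] => [[]]
  | c :: r => if c = '.' then [] :: pvSplitDots r else pvConsFirst [c] (pvSplitDots r)

theorem pvSplitDots_ne_nil (s : List Char) : pvSplitDots s ≠ [] := by
  cases s with
  | nil => simp [pvSplitDots]
  | cons c r =>
    simp only [pvSplitDots]
    split
    · simp
    · cases h : pvSplitDots r <;> simp [pvConsFirst]

theorem pvConsFirst_nil_of_ne_nil (l : List (List Char)) (h : l ≠ []) :
    pvConsFirst [] l = l := by
  cases l with
  | nil => exact absurd rfl h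
  | cons x xs => simp [pvConsFirst]

theorem pvConsFirst_append (p : List Char) (l m : List (List Char)) (h : l ≠ []) :
    pvConsFirst p (l ++ m) = pvConsFirst p l ++ m := by
  cases l with
  | nil => exact absurd rfl h
  | cons x xs => simp [pvConsFirst]

theorem pvConsFirst_consFirst (p q : List Char) (l : List (List Char)) :
    pvConsFirst p (pvConsFirst q l) = pvConsFirst (p ++ q) l := by
  cases l <;> simp [pvConsFirst]

theorem pv_go_spec (s : List Char) : ∀ (fuel : Nat) (cur : List Char) (acc : List (List Char)),
    s.length ≤ fuel →
    PySem.Chars.splitOn.go ['.'] fuel s cur acc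
      = acc.reverse ++ pvConsFirst cur.reverse (pvSplitDots s) := by
  induction s with
  | nil =>
    intro fuel cur acc _
    cases fuel <;> simp [PySem.Chars.splitOn.go, pvSplitDots, pvConsFirst]
  | cons c rest ih =>
    intro fuel cur acc hf
    cases fuel with
    | zero => simp at hf
    | succ f =>
      simp only [pvSplitDots]
      by_cases hc : c = '.'
      · subst hc
        rw [show PySem.Chars.splitOn.go ['.'] (f+1) ('.' :: rest) cur acc
              = PySem.Chars.splitOn.go ['.'] f rest [] (cur.reverse :: acc) by
            simp [PySem.Chars.splitOn.go, List.isPrefixOf]]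
        rw [ih f [] (cur.reverse :: acc) (by simpa using Nat.lt_succ_iff.mp (by simpa using hf))]
        simp [pvConsFirst]
        cases h : pvSplitDots rest with
        | nil => exact absurd h (pvSplitDots_ne_nil rest)
        | cons x xs => rfl
      · rw [show PySem.Chars.splitOn.go ['.'] (f+1) (c :: rest) cur acc
              = PySem.Chars.splitOn.go ['.'] f rest (c :: cur) acc by
            simp [PySem.Chars.splitOn.go, List.isPrefixOf, Ne.symm hc]]
        rw [ih f (c :: cur) acc (by simpa using Nat.lt_succ_iff.mp (by simpa using hf))]
        rw [if_neg hc, pvConsFirst_consFirst]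
        simp

theorem pv_split_eq (s : List Char) :
    PySem.Chars.split? s ['.'] = some (pvSplitDots s) := by
  simp only [PySem.Chars.split?, PySem.Chars.splitOn, List.isEmpty]
  rw [pv_go_spec s (s.length + 1) [] [] (by omega)]
  simp [pvConsFirst_nil_of_ne_nil _ (pvSplitDots_ne_nil s)]

theorem pvSplitDots_append (a b : List Char) :
    pvSplitDots (a ++ '.' :: b) = pvSplitDots a ++ pvSplitDots b := by
  induction a with
  | nil => simp [pvSplitDots]
  | cons c a' ih =>
    by_cases hc : c = '.'
    · subst hc; simp [pvSplitDots, ih]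
    · simp [pvSplitDots, hc, ih, pvConsFirst_append _ _ _ (pvSplitDots_ne_nil a')]

theorem pvSplitDots_nodot (a : List Char) (h : '.' ∉ a) : pvSplitDots a = [a] := by
  induction a with
  | nil => rfl
  | cons c a' ih =>
    have hc : c ≠ '.' := fun e => h (e ▸ List.mem_cons_self ..)
    have ha : '.' ∉ a' := fun m => h (List.mem_cons_of_mem _ m)
    simp [pvSplitDots, hc, ih ha, pvConsFirst]

theorem pv_inter_cons (x : List Char) (l : List (List Char)) (hl : l ≠ []) :
    ['.'].intercalate (x :: l) = x ++ '.' :: ['.'].intercalate l := by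
  cases l with
  | nil => exact absurd rfl hl
  | cons y l' => simp [List.intercalate]

theorem pv_join_splitDots (s : List Char) :
    PySem.Chars.join ['.'] (pvSplitDots s) = s := by
  simp only [PySem.Chars.join]
  induction s with
  | nil => simp [pvSplitDots, List.intercalate]
  | cons c r ih =>
    by_cases hc : c = '.'
    · subst hc
      rw [show pvSplitDots ('.' :: r) = [] :: pvSplitDots r by simp [pvSplitDots]]
      rw [pv_inter_cons _ _ (pvSplitDots_ne_nil r), ih]
      simp
    · rw [show pvSplitDots (c :: r) = pvConsFirst [c] (pvSplitDots r) by simp [pvSplitDots, hc]]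
      cases h : pvSplitDots r with
      | nil => exact absurd h (pvSplitDots_ne_nil r)
      | cons x xs =>
        rw [h] at ih
        cases xs with
        | nil =>
          simp [List.intercalate] at ih
          simp [pvConsFirst, List.intercalate, ih]
        | cons y ys =>
          rw [show pvConsFirst [c] (x :: y :: ys) = (c :: x) :: y :: ys by simp [pvConsFirst]]
          rw [pv_inter_cons _ _ (by simp)]
          rw [pv_inter_cons _ _ (by simp)] at ih
          simp [ih]

theorem pv_join_append2 (m : List (List Char)) (a b : List Char) (hm : m ≠ []) :
    PySem.Chars.join ['.'] (m ++ [a, b])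
      = PySem.Chars.join ['.'] m ++ '.' :: (a ++ '.' :: b) := by
  simp only [PySem.Chars.join]
  induction m with
  | nil => exact absurd rfl hm
  | cons x m' ih =>
    cases m' with
    | nil => simp [List.intercalate]
    | cons z zs =>
      rw [List.cons_append, pv_inter_cons _ _ (by simp),
          pv_inter_cons x (z :: zs) (by simp), ih (by simp)]
      simp

theorem pv_pyGet_neg2 (m : List (List Char)) (a b : List Char) :
    PySem.List.pyGet? (m ++ [a, b]) (-2) = some a := by
  simp [PySem.List.pyGet?, PySem.List.pyIdx?]

theorem pv_pyGet_neg1 (m : List (List Char)) (a b : List Char) :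
    PySem.List.pyGet? (m ++ [a, b]) (-1) = some b := by
  simp [PySem.List.pyGet?, PySem.List.pyIdx?]

theorem pv_take_m (m : List (List Char)) (a b : List Char) :
    PySem.List.slice (m ++ [a, b]) none (some (-2)) = m := by
  rw [PySem.List.slice_to_neg_ofNat _ 2 (by omega)]
  simp

-- core equivalence on the already-normalised hostname
theorem pv_endswith_of_parts (h : List Char) (m : List (List Char)) (x : List Char)
    (hm : m ≠ []) (hh : pvSplitDots h = m ++ ["batchivo".toList, x]) :
    PySem.Chars.endswith h ('.' :: ("batchivo".toList ++ '.' :: x)) = true := by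
  rw [PySem.Chars.endswith_iff]
  refine ⟨PySem.Chars.join ['.'] m, ?_⟩
  have := pv_join_splitDots h
  rw [hh, pv_join_append2 _ _ _ hm] at this
  simpa using this

theorem pv_suffix_parts (p : List Char) (x : List Char) (hx : '.' ∉ x) :
    pvSplitDots (p ++ '.' :: ("batchivo".toList ++ '.' :: x))
      = pvSplitDots p ++ ["batchivo".toList, x] := by
  rw [pvSplitDots_append, pvSplitDots_append, pvSplitDots_nodot x hx,
      pvSplitDots_nodot ("batchivo".toList) (by decide)]
  simp

theorem pv_slice_suffix (p : List Char) (c : Char) (s : List Char) :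
    PySem.Chars.slice (p ++ c :: s) none (some (-(((c :: s).length : Int)))) = p := by
  rw [PySem.Chars.slice_eq_listSlice, PySem.List.slice_to_neg_natCast _ _ (by simp)]
  rw [List.length_append, Nat.add_sub_cancel, List.take_left]

theorem pv_core (h : List Char) :
    (if h ∈ pvPLATFORM_DOMAINS then none
     else (pvTryBases h ["batchivo.shop".toList, "batchivo.com".toList]).map String.ofList)
    = (let parts := (PySem.Chars.split? h ['.']).getD []
       if 3 ≤ parts.length ∧ PySem.List.pyGet? parts (-2) = some "batchivo".toList ∧
           (PySem.List.pyGet? parts (-1) = some "com".toList ∨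
            PySem.List.pyGet? parts (-1) = some "shop".toList) then
         let sub := PySem.Chars.join ['.'] (PySem.List.slice parts none (some (-2)))
         if sub ∈ pvPLATFORM_SUBDOMAINS then none else some (String.ofList sub)
       else none) := by
  by_cases hPD : h ∈ pvPLATFORM_DOMAINS
  · rw [if_pos hPD]
    simp [pvPLATFORM_DOMAINS] at hPD
    rcases hPD with rfl | rfl | rfl | rfl | rfl | rfl <;> decide
  · rw [if_neg hPD]
    simp only [pv_split_eq, Option.getD_some]
    have eS : ("batchivo.shop".toList : List Char)
        = "batchivo".toList ++ '.' :: "shop".toList := by decide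
    have eC : ("batchivo.com".toList : List Char)
        = "batchivo".toList ++ '.' :: "com".toList := by decide
    by_cases hS : PySem.Chars.endswith h ('.' :: "batchivo.shop".toList) = true
    · obtain ⟨p, rfl⟩ : ∃ p, h = p ++ '.' :: "batchivo.shop".toList := by
        rcases (PySem.Chars.endswith_iff ..).mp hS with ⟨t, ht⟩
        exact ⟨t, ht.symm⟩
      have hparts : pvSplitDots (p ++ '.' :: "batchivo.shop".toList)
          = pvSplitDots p ++ ["batchivo".toList, "shop".toList] := by
        rw [eS]; exact pv_suffix_parts p _ (by decide)
      have hm : pvSplitDots p ≠ [] := pvSplitDots_ne_nil p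
      have hlen : 1 ≤ (pvSplitDots p).length := List.length_pos_iff.mpr hm
      have hsubA : PySem.Chars.slice (p ++ '.' :: "batchivo.shop".toList) none
          (some (-((("batchivo.shop".toList).length : Int) + 1))) = p := by
        have e14 : ((("batchivo.shop".toList).length : Int) + 1)
            = ((('.' :: "batchivo.shop".toList).length : Int)) := by
          rw [show ("batchivo.shop".toList).length = 13 from by decide,
              show ('.' :: "batchivo.shop".toList).length = 14 from by decide]
          norm_num
        rw [e14, pv_slice_suffix]
      rw [hparts]
      rw [if_pos ⟨by simpa using hlen, by rw [pv_pyGet_neg2], Or.inr (by rw [pv_pyGet_neg1])⟩]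
      rw [pv_take_m, pv_join_splitDots]
      have hC : PySem.Chars.endswith (p ++ '.' :: "batchivo.shop".toList)
          ('.' :: "batchivo.com".toList) = false := by
        rw [Bool.eq_false_iff]
        intro hc
        rcases (PySem.Chars.endswith_iff ..).mp hc with ⟨q, hq⟩
        have := congrArg List.getLast? hq
        simp [List.getLast?_append] at this
      simp only [pvTryBases]
      rw [if_pos hS]
      simp only [hsubA]
      by_cases hmem : p ∈ pvPLATFORM_SUBDOMAINS
      · rw [if_pos hmem, if_pos hmem, if_neg (by simpa using hC)]
        simp
      · rw [if_neg hmem, if_neg hmem]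
        simp
    · by_cases hC : PySem.Chars.endswith h ('.' :: "batchivo.com".toList) = true
      · obtain ⟨p, rfl⟩ : ∃ p, h = p ++ '.' :: "batchivo.com".toList := by
          rcases (PySem.Chars.endswith_iff ..).mp hC with ⟨t, ht⟩
          exact ⟨t, ht.symm⟩
        have hparts : pvSplitDots (p ++ '.' :: "batchivo.com".toList)
            = pvSplitDots p ++ ["batchivo".toList, "com".toList] := by
          rw [eC]; exact pv_suffix_parts p _ (by decide)
        have hm : pvSplitDots p ≠ [] := pvSplitDots_ne_nil p
        have hlen : 1 ≤ (pvSplitDots p).length := List.length_pos_iff.mpr hm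
        have hsubA : PySem.Chars.slice (p ++ '.' :: "batchivo.com".toList) none
            (some (-((("batchivo.com".toList).length : Int) + 1))) = p := by
          have e13 : ((("batchivo.com".toList).length : Int) + 1)
              = ((('.' :: "batchivo.com".toList).length : Int)) := by
            rw [show ("batchivo.com".toList).length = 12 from by decide,
                show ('.' :: "batchivo.com".toList).length = 13 from by decide]
            norm_num
          rw [e13, pv_slice_suffix]
        rw [hparts]
        rw [if_pos ⟨by simpa using hlen, by rw [pv_pyGet_neg2], Or.inl (by rw [pv_pyGet_neg1])⟩]
        rw [pv_take_m, pv_join_splitDots]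
        simp only [pvTryBases]
        rw [if_neg hS, if_pos hC]
        simp only [hsubA]
        by_cases hmem : p ∈ pvPLATFORM_SUBDOMAINS
        · rw [if_pos hmem, if_pos hmem]
          simp
        · rw [if_neg hmem, if_neg hmem]
          simp
      · rw [if_neg ?cond]
        case cond =>
          rintro ⟨h3, h2, h1⟩
          rcases hrev : (pvSplitDots h).reverse with _ | ⟨b, _ | ⟨a, mr⟩⟩
          · have : (pvSplitDots h).length = 0 := by
              rw [← List.length_reverse, hrev]; simp
            omega
          · have : (pvSplitDots h).length = 1 := by
              rw [← List.length_reverse, hrev]; simp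
            omega
          · have hdec : pvSplitDots h = mr.reverse ++ [a, b] := by
              have := congrArg List.reverse hrev
              simpa using this
            have hmr : mr.reverse ≠ [] := by
              intro e
              have hmrnil : mr = [] := by simpa using e
              subst hmrnil
              have := congrArg List.length hdec
              simp at this
              omega
            rw [hdec, pv_pyGet_neg2] at h2
            rw [hdec, pv_pyGet_neg1] at h1
            obtain rfl : a = "batchivo".toList := by simpa using h2
            rcases h1 with h1 | h1
            · obtain rfl : b = "com".toList := by simpa using h1
              have := pv_endswith_of_parts h mr.reverse _ hmr hdec
              rw [← eC] at this
              exact absurd this hC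
            · obtain rfl : b = "shop".toList := by simpa using h1
              have := pv_endswith_of_parts h mr.reverse _ hmr hdec
              rw [← eS] at this
              exact absurd this hS
        simp only [pvTryBases]
        rw [if_neg hS, if_neg hC]
        simp

-- ===== VERDICT (by name: the statement is the Claim_ definition above) =====
theorem extract_subdomain_spec : Claim_equal_extract_subdomain := by
  intro hostname _
  unfold Spec_extract_subdomain extract_subdomain extract_subdomain_alt
  exact pv_core _
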